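-- pv_equiv track=rewrite | github.com/open-pulse/opps | opps/io/pcf/pcf_reader.py | group_structures
-- ===== SOURCE A (Python) =====
-- from itertools import pairwise
--
-- def group_structures(lines_list):
--
--     structures_list = []
--     index_list = []
--     for i,line in enumerate(lines_list):
--         if line[0:4] != "    ":
--             index_list.append(i)
--     for a,b in pairwise(index_list):
--         structures_list.append(lines_list[a:b])
--
--     return structures_list
-- ===== SOURCE B (Python) =====
-- def group_structures(lines_list):
--     structures_list = []
--     current = None
--     for line in lines_list:
--         if line[0:4] != "    ":
--             if current is not None:
--                 structures_list.append(current)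
--             current = [line]
--         elif current is not None:
--             current.append(line)
--     return structures_list
-- ===== Notes on version B (the rewrite author's own statement) =====
-- stated objective: simpler
-- what changed: Replaced the two-pass index-collection + pairwise slicing with a single pass that maintains the current group and flushes it at each non-indented boundary (never flushing the trailing group, matching A).
import Mathlib
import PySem

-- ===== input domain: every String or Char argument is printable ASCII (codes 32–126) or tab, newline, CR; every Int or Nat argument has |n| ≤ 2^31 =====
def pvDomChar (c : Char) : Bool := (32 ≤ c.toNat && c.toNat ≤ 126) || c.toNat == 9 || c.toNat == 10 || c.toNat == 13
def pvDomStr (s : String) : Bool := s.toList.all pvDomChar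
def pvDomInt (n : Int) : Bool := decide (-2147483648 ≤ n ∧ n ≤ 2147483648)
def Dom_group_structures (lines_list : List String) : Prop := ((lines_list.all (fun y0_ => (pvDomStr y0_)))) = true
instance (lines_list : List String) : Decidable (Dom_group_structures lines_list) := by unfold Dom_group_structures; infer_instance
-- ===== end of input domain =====

-- B replaces A's two passes (collect boundary indices, then slice between consecutive indices)
-- by a single pass keeping the current group, flushed at each boundary (the trailing group is
-- never flushed, matching A); objective: simpler.

-- ===== PORT A =====
-- itertools.pairwise(xs) is ported as xs.zip xs.tail (exact: consecutive pairs, empty for len < 2).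
def group_structures (lines_list : List String) : List (List String) :=
  let index_list : List Int :=
    (PySem.List.enumerate lines_list 0).foldl
      (fun acc iv => if PySem.Str.slice iv.2 (some 0) (some 4) ≠ "    " then acc ++ [iv.1] else acc) []
  (index_list.zip index_list.tail).foldl
    (fun acc ab => acc ++ [PySem.List.slice lines_list (some ab.1) (some ab.2)]) []

-- ===== PORT B =====
-- B-side helper: the body of Source B's for-loop, on state (structures_list, current).
def bStep (P : String → Prop) [DecidablePred P]
    (st : List (List String) × Option (List String)) (line : String) :
    List (List String) × Option (List String) :=
  if P line then
    ((match st.2 with | some c => st.1 ++ [c] | none => st.1), some [line])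
  else
    (st.1, st.2.map (fun c => c ++ [line]))

def group_structures_alt (lines_list : List String) : List (List String) :=
  (lines_list.foldl
    (bStep (fun line => PySem.Str.slice line (some 0) (some 4) ≠ "    "))
    ([], none)).1

-- ===== PRECONDITION & SPEC =====
def Spec_group_structures (lines_list : List String) (out : List (List String)) : Prop := out = group_structures_alt lines_list
instance (lines_list : List String) (out : List (List String)) : Decidable (Spec_group_structures lines_list out) := by unfold Spec_group_structures; infer_instance

-- ===== CLAIM (what is proved, stated in full; the proofs are below) =====
def Claim_equal_group_structures : Prop := ∀ (lines_list : List String), Dom_group_structures lines_list → Spec_group_structures lines_list (group_structures lines_list)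

-- ===== LEMMAS AND PROOFS =====

-- consecutive pairs (itertools.pairwise)
def pairsN {α : Type} (xs : List α) : List (α × α) := xs.zip xs.tail

-- Nat indices of the lines satisfying P, starting at offset k
def idxL (P : String → Prop) [DecidablePred P] (k : Nat) : List String → List Nat
  | [] => []
  | l :: t => if P l then k :: idxL P (k + 1) t else idxL P (k + 1) t

-- the Nat-slice L[a:b]
def sliceN (L : List String) (a b : Nat) : List String := (L.drop a).take (b - a)

-- B's loop with current group c, returning the groups still to be appended
def Hacc (P : String → Prop) [DecidablePred P] (c : List String) : List String → List (List String)
  | [] => []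
  | l :: t => if P l then c :: Hacc P [l] t else Hacc P (c ++ [l]) t

-- B's loop with current = None
def Bsp (P : String → Prop) [DecidablePred P] : List String → List (List String)
  | [] => []
  | l :: t => if P l then Hacc P [l] t else Bsp P t

theorem pairsN_cons_cons {α : Type} (a b : α) (r : List α) :
    pairsN (a :: b :: r) = (a, b) :: pairsN (b :: r) := rfl

theorem foldl_snoc {α β : Type} (g : α → β) (xs : List α) :
    ∀ acc : List β, xs.foldl (fun a x => a ++ [g x]) acc = acc ++ xs.map g := by
  induction xs with
  | nil => intro acc; simp
  | cons x t ih => intro acc; simp [ih]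

theorem E1 (P : String → Prop) [DecidablePred P] (ls : List String) :
    ∀ (k : Nat) (acc : List Int),
      (PySem.List.enumerate ls ((k : Nat) : Int)).foldl
        (fun acc iv => if P iv.2 then acc ++ [iv.1] else acc) acc
      = acc ++ (idxL P k ls).map (fun n : Nat => (n : Int)) := by
  induction ls with
  | nil => intro k acc; simp [PySem.List.enumerate, idxL]
  | cons l t ih =>
    intro k acc
    have hc : ((k : Nat) : Int) + 1 = (((k + 1 : Nat)) : Int) := by push_cast; ring
    rw [PySem.List.enumerate_cons, List.foldl_cons, hc, ih (k + 1)]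
    by_cases hp : P l <;> simp [idxL, hp]

theorem B1 (P : String → Prop) [DecidablePred P] (ls : List String) :
    ∀ (res : List (List String)) (c : List String),
      (ls.foldl (bStep P) (res, some c)).1 = res ++ Hacc P c ls := by
  induction ls with
  | nil => intro res c; simp [Hacc]
  | cons l t ih =>
    intro res c
    rw [List.foldl_cons]
    by_cases hp : P l
    · simp only [bStep, hp, if_pos]
      rw [ih (res ++ [c]) [l]]
      simp [Hacc, hp]
    · simp only [bStep, hp, if_false, Option.map_some]
      rw [ih res (c ++ [l])]
      simp [Hacc, hp]

theorem B0 (P : String → Prop) [DecidablePred P] (ls : List String) :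
    ∀ res : List (List String),
      (ls.foldl (bStep P) (res, none)).1 = res ++ Bsp P ls := by
  induction ls with
  | nil => intro res; simp [Bsp]
  | cons l t ih =>
    intro res
    rw [List.foldl_cons]
    by_cases hp : P l
    · simp only [bStep, hp, if_pos]
      rw [B1 P t res [l]]
      simp [Bsp, hp]
    · simp only [bStep, hp, if_false, Option.map_none]
      rw [ih res]
      simp [Bsp, hp]

theorem drop_cons_succ (L : List String) (k : Nat) (l : String) (t : List String)
    (h : L.drop k = l :: t) : L.drop (k + 1) = t := by
  rw [← List.tail_drop, h]
  rfl

theorem sliceN_one (L : List String) (k : Nat) (l : String) (t : List String)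
    (h : L.drop k = l :: t) : sliceN L k (k + 1) = [l] := by
  simp [sliceN, h]

theorem sliceN_extend (L : List String) (a k : Nat) (l : String) (t : List String)
    (hak : a ≤ k) (h : L.drop k = l :: t) :
    sliceN L a (k + 1) = sliceN L a k ++ [l] := by
  unfold sliceN
  have h1 : k + 1 - a = (k - a) + 1 := by omega
  rw [h1, List.take_add, List.drop_drop]
  have h2 : a + (k - a) = k := by omega
  rw [h2, h]
  simp

theorem M1 (P : String → Prop) [DecidablePred P] (L : List String) :
    ∀ (t : List String) (k a : Nat), a ≤ k → L.drop k = t →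
      (pairsN (a :: idxL P k t)).map (fun ab => sliceN L ab.1 ab.2)
        = Hacc P (sliceN L a k) t := by
  intro t
  induction t with
  | nil => intro k a _ _; simp [pairsN, idxL, Hacc]
  | cons l t' ih =>
    intro k a hak h
    have hk1 : L.drop (k + 1) = t' := drop_cons_succ L k l t' h
    by_cases hp : P l
    · simp only [idxL, hp, if_pos, Hacc]
      rw [pairsN_cons_cons, List.map_cons]
      have := ih (k + 1) k (Nat.le_succ k) hk1
      rw [sliceN_one L k l t' h] at this
      rw [this]
    · simp only [idxL, hp, if_false, Hacc]
      rw [ih (k + 1) a (Nat.le_succ_of_le hak) hk1,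
        sliceN_extend L a k l t' hak h]

theorem M2 (P : String → Prop) [DecidablePred P] (L : List String) :
    ∀ (t : List String) (k : Nat), L.drop k = t →
      (pairsN (idxL P k t)).map (fun ab => sliceN L ab.1 ab.2) = Bsp P t := by
  intro t
  induction t with
  | nil => intro k _; simp [pairsN, idxL, Bsp]
  | cons l t' ih =>
    intro k h
    have hk1 : L.drop (k + 1) = t' := drop_cons_succ L k l t' h
    by_cases hp : P l
    · simp only [idxL, hp, if_pos, Bsp]
      have := M1 P L t' (k + 1) k (Nat.le_succ k) hk1
      rw [sliceN_one L k l t' h] at this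
      exact this
    · simp only [idxL, hp, if_false, Bsp]
      exact ih (k + 1) hk1

theorem A_shape (P : String → Prop) [DecidablePred P] (L : List String) :
    (let index_list : List Int :=
      (PySem.List.enumerate L 0).foldl
        (fun acc iv => if P iv.2 then acc ++ [iv.1] else acc) [];
     (index_list.zip index_list.tail).foldl
       (fun acc ab => acc ++ [PySem.List.slice L (some ab.1) (some ab.2)]) [])
    = Bsp P L := by
  have hI : (PySem.List.enumerate L 0).foldl
      (fun acc iv => if P iv.2 then acc ++ [iv.1] else acc) []
      = (idxL P 0 L).map (fun n : Nat => (n : Int)) := by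
    have h := E1 P L 0 []
    rw [List.nil_append] at h
    exact h
  show (((PySem.List.enumerate L 0).foldl
      (fun acc iv => if P iv.2 then acc ++ [iv.1] else acc) []).zip
      ((PySem.List.enumerate L 0).foldl
      (fun acc iv => if P iv.2 then acc ++ [iv.1] else acc) []).tail).foldl
      (fun acc ab => acc ++ [PySem.List.slice L (some ab.1) (some ab.2)]) [] = Bsp P L
  rw [hI, foldl_snoc, List.nil_append]
  have ht : ((idxL P 0 L).map (fun n : Nat => (n : Int))).tail
      = (idxL P 0 L).tail.map (fun n : Nat => (n : Int)) := by
    cases idxL P 0 L <;> rfl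
  rw [ht, List.zip_map, List.map_map]
  refine Eq.trans (List.map_congr_left ?_) (M2 P L L 0 rfl)
  intro ab _
  show PySem.List.slice L (some ((ab.1 : Nat) : Int)) (some ((ab.2 : Nat) : Int))
      = sliceN L ab.1 ab.2
  rw [PySem.List.slice_natCast]
  rfl

theorem main_eq (ls : List String) : group_structures ls = group_structures_alt ls := by
  have hA : group_structures ls
      = Bsp (fun line => PySem.Str.slice line (some 0) (some 4) ≠ "    ") ls :=
    A_shape (fun line => PySem.Str.slice line (some 0) (some 4) ≠ "    ") ls
  have hB : group_structures_alt ls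
      = Bsp (fun line => PySem.Str.slice line (some 0) (some 4) ≠ "    ") ls :=
    (B0 (fun line => PySem.Str.slice line (some 0) (some 4) ≠ "    ") ls []).trans
      (List.nil_append _)
  rw [hA, hB]

-- ===== VERDICT (by name: the statement is the Claim_ definition above) =====
theorem group_structures_spec : Claim_equal_group_structures := by
  intro ls _
  unfold Spec_group_structures
  exact main_eq ls
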